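-- pv_equiv track=rewrite | github.com/koa73/modeler | modelMaker.py | create_uniq_names
-- ===== SOURCE A (Python) =====
-- def create_uniq_names(first, last, offset=0, step=0, pat='weights_b25_150_'):
--     arr = []
--     for i in range(first, last):
--         arr.append(i)
--     d = {}
--
--     for a in arr:
--         for b in arr:
--             for c in arr:
--                 # remove variants with the same values
--                 if (a == b == c) or (a == b) or (a == c) or (b == c):
--                     continue
--                 else:
--                     d[str(sorted([a, b, c]))] = [pat + str(c), pat + str(b), pat + str(a)]
--
--     arr = []
--     idx = 0
--     for item in list(d.values()):
--         idx += 1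
--         if idx <= offset:
--             continue
--         arr.append(item)
--
--         if (idx == step + offset):
--             break
--     return arr
-- ===== SOURCE B (Python) =====
-- def create_uniq_names(first, last, offset=0, step=0, pat='weights_b25_150_'):
--     # Enumerate the distinct-value combinations directly in sorted order
--     # (x < y < z), which is exactly the dict's insertion order in the original,
--     # with the final (last-written) value [pat+x, pat+y, pat+z]; then slice.
--     start = offset if offset > 0 else 0
--     end = step + offset
--     out = []
--     for x in range(first, last):
--         for y in range(x + 1, last):
--             for z in range(y + 1, last):
--                 out.append([pat + str(x), pat + str(y), pat + str(z)])
--     return out[start:end] if end > start else out[start:]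
-- ===== Notes on version B (the rewrite author's own statement) =====
-- stated objective: alternative
-- what changed: B enumerates the sorted triples x<y<z directly with three nested ranges and slices the result arithmetically, instead of scanning all n^3 ordered triples, deduplicating them through a dict keyed by str(sorted([a,b,c])) and slicing with an index/continue/break loop.
import Mathlib
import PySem

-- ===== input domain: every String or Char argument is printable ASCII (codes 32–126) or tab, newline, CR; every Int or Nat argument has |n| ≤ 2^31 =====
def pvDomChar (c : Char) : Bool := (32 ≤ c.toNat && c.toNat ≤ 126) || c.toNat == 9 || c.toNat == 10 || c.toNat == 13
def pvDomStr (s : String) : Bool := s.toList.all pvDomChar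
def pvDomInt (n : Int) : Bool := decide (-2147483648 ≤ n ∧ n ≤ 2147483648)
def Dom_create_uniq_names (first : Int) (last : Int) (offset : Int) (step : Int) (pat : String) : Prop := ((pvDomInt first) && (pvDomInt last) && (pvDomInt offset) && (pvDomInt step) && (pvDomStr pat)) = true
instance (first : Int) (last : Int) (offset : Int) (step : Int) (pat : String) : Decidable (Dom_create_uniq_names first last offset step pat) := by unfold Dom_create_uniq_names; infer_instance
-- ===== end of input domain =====

-- B enumerates the sorted triples x<y<z directly and slices the result arithmetically,
-- instead of deduplicating all ordered triples through a str-keyed dict and slicing with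
-- an index/continue/break loop (objective: alternative).

-- ===== PORT A =====

-- hand port of Python's str(<list of ints>) ("[a, b, c]"); exact for int lists
def pvReprChars : List Int → List Char
  | [] => []
  | [x] => PySem.Int.toChars x
  | x :: xs => PySem.Int.toChars x ++ ',' :: ' ' :: pvReprChars xs

def pvStrOfIntList (l : List Int) : String := String.ofList ('[' :: (pvReprChars l ++ [']']))

-- the output loop of A: idx += 1; continue while idx <= offset; append; break at idx == step+offset
def pvOutLoop (offset step : Int) : Int → List (List String) → List (List String) → List (List String)
  | _, arr, [] => arr
  | idx, arr, item :: rest =>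
    if idx + 1 ≤ offset then pvOutLoop offset step (idx + 1) arr rest
    else if idx + 1 = step + offset then arr ++ [item]
    else pvOutLoop offset step (idx + 1) (arr ++ [item]) rest

def create_uniq_names (first : Int) (last : Int) (offset : Int) (step : Int) (pat : String) : List (List String) :=
  let arr : List Int := (PySem.List.pyRange first last 1).foldl (fun a i => a ++ [i]) []
  let d : PySem.Dict String (List String) :=
    arr.foldl (fun d a =>
      arr.foldl (fun d b =>
        arr.foldl (fun d c =>
          if (a = b ∧ b = c) ∨ a = b ∨ a = c ∨ b = c then d
          else d.insert (pvStrOfIntList (PySem.List.sorted [a, b, c] (fun x => x)))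
                 [pat ++ PySem.Int.toStr c, pat ++ PySem.Int.toStr b, pat ++ PySem.Int.toStr a]) d) d)
      PySem.Dict.empty
  pvOutLoop offset step 0 [] d.values

-- ===== PORT B =====
def create_uniq_names_alt (first : Int) (last : Int) (offset : Int) (step : Int) (pat : String) : List (List String) :=
  let start : Int := if offset > 0 then offset else 0
  let stop : Int := step + offset
  let out : List (List String) :=
    (PySem.List.pyRange first last 1).foldl (fun out x =>
      (PySem.List.pyRange (x + 1) last 1).foldl (fun out y =>
        (PySem.List.pyRange (y + 1) last 1).foldl (fun out z =>
          out ++ [[pat ++ PySem.Int.toStr x, pat ++ PySem.Int.toStr y, pat ++ PySem.Int.toStr z]]) out) out) []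
  if stop > start then PySem.List.slice out (some start) (some stop)
  else PySem.List.slice out (some start) none

-- ===== PRECONDITION & SPEC =====
def Spec_create_uniq_names (first : Int) (last : Int) (offset : Int) (step : Int) (pat : String) (out : List (List String)) : Prop := out = create_uniq_names_alt first last offset step pat
instance (first : Int) (last : Int) (offset : Int) (step : Int) (pat : String) (out : List (List String)) : Decidable (Spec_create_uniq_names first last offset step pat out) := by unfold Spec_create_uniq_names; infer_instance

-- ===== CLAIM (what is proved, stated in full; the proofs are below) =====
def Claim_equal_create_uniq_names : Prop := ∀ (first : Int) (last : Int) (offset : Int) (step : Int) (pat : String), Dom_create_uniq_names first last offset step pat → Spec_create_uniq_names first last offset step pat (create_uniq_names first last offset step pat)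

-- ===== LEMMAS AND PROOFS =====
-- ---------- small abbreviations used only by the proofs ----------

def pvL (first last : Int) : List Int := PySem.List.pyRange first last 1

def pvKey3 (t : Int × Int × Int) : String := pvStrOfIntList [t.1, t.2.1, t.2.2]

def pvVal (pat : String) (t : Int × Int × Int) : List String :=
  [pat ++ PySem.Int.toStr t.2.2, pat ++ PySem.Int.toStr t.2.1, pat ++ PySem.Int.toStr t.1]

def pvFinal (pat : String) (t : Int × Int × Int) : List String :=
  [pat ++ PySem.Int.toStr t.1, pat ++ PySem.Int.toStr t.2.1, pat ++ PySem.Int.toStr t.2.2]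

def pvDistinct (t : Int × Int × Int) : Prop := t.1 ≠ t.2.1 ∧ t.1 ≠ t.2.2 ∧ t.2.1 ≠ t.2.2

def pvM3 : Int × Int × Int → Int × Int × Int
  | (a, b, c) =>
    if a ≤ b then (if b ≤ c then (a, b, c) else (if a ≤ c then (a, c, b) else (c, a, b)))
    else (if a ≤ c then (b, a, c) else (if b ≤ c then (b, c, a) else (c, b, a)))

def pvLt3 (t u : Int × Int × Int) : Prop :=
  t.1 < u.1 ∨ (t.1 = u.1 ∧ (t.2.1 < u.2.1 ∨ (t.2.1 = u.2.1 ∧ t.2.2 < u.2.2)))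

def pvT (first last : Int) : List (Int × Int × Int) :=
  (pvL first last).flatMap fun a => (pvL first last).flatMap fun b =>
    ((pvL first last).filter fun c => !decide ((a = b ∧ b = c) ∨ a = b ∨ a = c ∨ b = c)).map fun c => (a, b, c)

def pvCombos (first last : Int) : List (Int × Int × Int) :=
  (pvT first last).filter fun t => pvM3 t == t

def pvBtrip (first last : Int) : List (Int × Int × Int) :=
  (pvL first last).flatMap fun x => (PySem.List.pyRange (x + 1) last 1).flatMap fun y =>
    (PySem.List.pyRange (y + 1) last 1).map fun z => (x, y, z)

-- ---------- generic order facts ----------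

theorem pvLt3_asymm {t u : Int × Int × Int} (h1 : pvLt3 t u) (h2 : pvLt3 u t) : False := by
  rcases t with ⟨a, b, c⟩; rcases u with ⟨d, e, f⟩
  simp only [pvLt3] at h1 h2; omega

theorem pvLt3_irrefl {t : Int × Int × Int} (h : pvLt3 t t) : False := pvLt3_asymm h h

theorem pv_nodup_of_pairwise {l : List (Int × Int × Int)} (h : l.Pairwise pvLt3) : l.Nodup :=
  h.imp (fun ha => by rintro rfl; exact pvLt3_irrefl ha)

-- ---------- pvM3 case facts ----------

theorem pvM3_sorted {t : Int × Int × Int} (h : pvDistinct t) :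
    (pvM3 t).1 < (pvM3 t).2.1 ∧ (pvM3 t).2.1 < (pvM3 t).2.2 := by
  rcases t with ⟨a, b, c⟩; rcases h with ⟨h1, h2, h3⟩
  simp only [pvM3]; split_ifs <;> simp_all <;> omega

theorem pvM3_fix {t : Int × Int × Int} (h : pvDistinct t) :
    pvM3 t = t ↔ (t.1 < t.2.1 ∧ t.2.1 < t.2.2) := by
  rcases t with ⟨a, b, c⟩; rcases h with ⟨h1, h2, h3⟩
  simp only [pvM3]; split_ifs <;> simp_all [Prod.ext_iff] <;> omega

theorem pvM3_le {t : Int × Int × Int} (h : pvDistinct t) : pvLt3 (pvM3 t) t ∨ pvM3 t = t := by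
  rcases t with ⟨a, b, c⟩; rcases h with ⟨h1, h2, h3⟩
  simp only [pvM3, pvLt3]; split_ifs <;> simp_all

theorem pvM3_idem {t : Int × Int × Int} (h : pvDistinct t) : pvM3 (pvM3 t) = pvM3 t := by
  have hs := pvM3_sorted h
  rcases hp : pvM3 t with ⟨x, y, z⟩
  rw [hp] at hs
  simp only [pvM3]; split_ifs <;> simp_all <;> omega

theorem pvM3_fiber {u : Int × Int × Int} {x y z : Int} (h : pvM3 u = (x, y, z)) :
    u ∈ [(x,y,z), (x,z,y), (y,x,z), (y,z,x), (z,x,y), (z,y,x)] := by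
  rcases u with ⟨a, b, c⟩
  simp only [pvM3] at h
  split_ifs at h <;> (injection h with h1 h'; injection h' with h2 h3; subst h1; subst h2; subst h3; simp)

theorem pvM3_comp_mem {u : Int × Int × Int} (h : pvDistinct u) :
    pvDistinct (pvM3 u) ∧ (pvM3 u).1 ∈ [u.1, u.2.1, u.2.2] ∧ (pvM3 u).2.1 ∈ [u.1, u.2.1, u.2.2]
      ∧ (pvM3 u).2.2 ∈ [u.1, u.2.1, u.2.2] := by
  rcases u with ⟨a, b, c⟩; rcases h with ⟨h1, h2, h3⟩
  simp only [pvM3, pvDistinct]; split_ifs <;> simp_all <;> omega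

-- sorted([a,b,c]) in A's key is exactly pvM3
theorem pv_sorted_eq_m3 {a b c : Int} (h : pvDistinct (a, b, c)) :
    PySem.List.sorted [a, b, c] (fun x => x) = [(pvM3 (a,b,c)).1, (pvM3 (a,b,c)).2.1, (pvM3 (a,b,c)).2.2] := by
  obtain ⟨h1, h2, h3⟩ : a ≠ b ∧ a ≠ c ∧ b ≠ c := h
  simp only [pvM3]
  split_ifs with h4 h5 h6 h7 h8 <;> dsimp only <;> apply PySem.List.sorted_eq_of_perm_of_pairwise_lt
  · exact .refl _
  · simp; omega
  · exact .cons a (.swap b c [])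
  · simp; omega
  · exact .trans (.swap a c [b]) (.cons a (.swap b c []))
  · simp; omega
  · exact .swap a b [c]
  · simp; omega
  · exact .trans (.cons b (.swap a c [])) (.swap a b [c])
  · simp; omega
  · exact .trans (.swap b c [a]) (.trans (.cons b (.swap a c [])) (.swap a b [c]))
  · simp; omega

-- ---------- generic dict / set / list lemmas ----------

theorem pv_getLast?_cons_some {α : Type} {u : α} (a : α) {l : List α} (h : l.getLast? = some u) :
    (a :: l).getLast? = some u := by
  cases l with
  | nil => simp at h
  | cons b l => rw [List.getLast?_cons_cons]; exact h

theorem pv_get?_fold {κ ν β : Type} [BEq κ] [LawfulBEq κ] [DecidableEq κ] (key : β → κ) (val : β → ν) :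
    ∀ (l : List β) (d : PySem.Dict κ ν) (q : κ),
      (l.foldl (fun d t => d.insert (key t) (val t)) d).get? q =
        ((l.filter fun t => key t == q).getLast?.elim (d.get? q) fun t => some (val t)) := by
  intro l
  induction l with
  | nil => intro d q; simp
  | cons t l ih =>
    intro d q
    simp only [List.foldl_cons, List.filter_cons]
    rw [ih]
    by_cases hk : (key t == q) = true
    · simp only [hk, if_pos]
      cases hlast : (l.filter fun t => key t == q).getLast? with
      | some u => rw [pv_getLast?_cons_some t hlast]; simp [hlast]
      | none =>
        have hnil : (l.filter fun t => key t == q) = [] := by simpa using hlast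
        rw [hnil] at hlast ⊢
        simp only [hlast, Option.elim]
        simp [PySem.Dict.get?_insert, (eq_of_beq hk)]
    · simp only [hk]
      cases hlast : (l.filter fun t => key t == q).getLast? with
      | some u => simp [hlast]
      | none =>
        have hqt : q ≠ key t := fun h => hk (beq_iff_eq.mpr h.symm)
        simp [hlast, PySem.Dict.get?_insert, hqt]

theorem pv_update_structure {α : Type} [BEq α] [LawfulBEq α] (l s : List α) :
    PySem.Set.update s l = s ++ PySem.Set.update [] (l.filter fun x => !s.contains x) := by
  match l with
  | [] => simp [PySem.Set.update]
  | x :: l =>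
    show PySem.Set.update (PySem.Set.add s x) l = _
    by_cases hc : s.contains x = true
    · rw [show PySem.Set.add s x = s from by
        simp only [PySem.Set.add, PySem.Set.contains]; rw [if_pos hc]]
      rw [pv_update_structure l s]
      rw [List.filter_cons, if_neg (by rw [Bool.not_eq_true']; intro h; rw [h] at hc; exact Bool.false_ne_true hc)]
    · rw [show PySem.Set.add s x = s ++ [x] from by
        simp only [PySem.Set.add, PySem.Set.contains]; rw [if_neg hc]]
      rw [pv_update_structure l (s ++ [x])]
      rw [List.filter_cons, if_pos (by rw [Bool.not_eq_true']; exact Bool.of_not_eq_true hc)]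
      show _ = s ++ PySem.Set.update (PySem.Set.add [] x) (l.filter fun y => !s.contains y)
      rw [show PySem.Set.add ([] : List α) x = [x] from rfl]
      rw [pv_update_structure (l.filter fun y => !s.contains y) [x]]
      rw [List.filter_filter, List.append_assoc]
      have hpred : (l.filter fun a => (!([x] : List α).contains a) && !s.contains a) =
          (l.filter fun a => !(s ++ [x]).contains a) := by
        apply List.filter_congr
        intro a _
        by_cases h1 : a ∈ s <;> by_cases h2 : a = x <;> simp [h1, h2]
      rw [hpred]
  termination_by l.length
  decreasing_by all_goals simp [Nat.lt_succ_iff, List.length_filter_le]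

theorem pv_dedup_cons {α : Type} [BEq α] [LawfulBEq α] (x : α) (l : List α) :
    PySem.List.dedup (x :: l) = x :: PySem.List.dedup (l.filter fun y => !(y == x)) := by
  show PySem.Set.update (PySem.Set.add [] x) l = _
  rw [show PySem.Set.add ([] : List α) x = [x] from rfl, pv_update_structure l [x]]
  have hpred : (l.filter fun a => !([x] : List α).contains a) = (l.filter fun y => !(y == x)) := by
    apply List.filter_congr; intro a _; simp
  rw [hpred]
  rfl

theorem pv_dedup_map_inj {α β : Type} [BEq α] [LawfulBEq α] [BEq β] [LawfulBEq β]
    (g : α → β) (hg : Function.Injective g) (l : List α) :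
    PySem.List.dedup (l.map g) = (PySem.List.dedup l).map g := by
  match l with
  | [] => rfl
  | x :: l =>
    rw [List.map_cons, pv_dedup_cons, pv_dedup_cons, List.filter_map]
    have hpred : (l.filter ((fun y => !(y == g x)) ∘ g)) = (l.filter fun y => !(y == x)) := by
      apply List.filter_congr
      intro a _
      by_cases h : a = x
      · subst h; simp
      · simp only [Function.comp]
        rw [beq_false_of_ne h, beq_false_of_ne (fun hgeq => h (hg hgeq))]
    rw [hpred, pv_dedup_map_inj g hg (l.filter fun y => !(y == x)), List.map_cons]
  termination_by l.length
  decreasing_by simp [Nat.lt_succ_iff, List.length_filter_le]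

theorem pv_dedup_retract {α : Type} [BEq α] [LawfulBEq α] (r : α → α → Prop)
    (hasym : ∀ a b, r a b → r b a → False) (f : α → α) (M : List α)
    (hP : M.Pairwise r) (h1 : ∀ t ∈ M, f t ∈ M) (h2 : ∀ t ∈ M, r (f t) t ∨ f t = t)
    (h3 : ∀ t ∈ M, f (f t) = f t) :
    PySem.List.dedup (M.map f) = (M.filter fun t => f t == t).map f := by
  match M with
  | [] => rfl
  | t :: M' =>
    have hrt : ∀ u ∈ M', r t u := (List.pairwise_cons.mp hP).1
    have htM : t ∉ M' := fun hmem => hasym t t (hrt t hmem) (hrt t hmem)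
    have hft : f t = t := by
      rcases h2 t List.mem_cons_self with hr | he
      · rcases List.mem_cons.mp (h1 t List.mem_cons_self) with hm | hm
        · exact hm
        · exact absurd hr (fun hc => hasym _ _ hc (hrt _ hm))
      · exact he
    rw [List.map_cons, hft, pv_dedup_cons, List.filter_map]
    have hcomp : (M'.filter ((fun y => !(y == t)) ∘ f)) = (M'.filter fun u => !(f u == t)) := rfl
    have hM'' := pv_dedup_retract r hasym f
      (M'.filter fun u => !(f u == t))
      (List.Pairwise.sublist (List.filter_sublist) hP.tail)
      (by
        intro u hu
        rw [List.mem_filter] at hu ⊢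
        obtain ⟨hu1, hu2⟩ := hu
        refine ⟨?_, ?_⟩
        · have hmem : f u ∈ t :: M' := h1 u (List.mem_cons_of_mem _ hu1)
          rcases List.mem_cons.mp hmem with h | h
          · exact absurd (beq_iff_eq.mpr h) (by simpa using hu2)
          · exact h
        · rw [h3 u (List.mem_cons_of_mem _ hu1)]; exact hu2)
      (fun u hu => h2 u (List.mem_cons_of_mem _ (List.mem_of_mem_filter hu)))
      (fun u hu => h3 u (List.mem_cons_of_mem _ (List.mem_of_mem_filter hu)))
    rw [hcomp, hM'', List.filter_filter]
    have hfilt : (M'.filter fun a => (f a == a) && (!(f a == t))) =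
        (M'.filter fun u => f u == u) := by
      apply List.filter_congr
      intro u hu
      by_cases hq : (f u == u) = true
      · have hut : u ≠ t := fun e => htM (e ▸ hu)
        have hfu : (f u == t) = false := by rw [eq_of_beq hq]; exact beq_false_of_ne hut
        simp [hfu, hq]
      · simp [hq]

    rw [hfilt, List.filter_cons, if_pos (beq_iff_eq.mpr hft), List.map_cons, hft]
  termination_by M.length
  decreasing_by simp [Nat.lt_succ_iff, List.length_filter_le]

-- ---------- the output loop of A versus B's slice ----------

theorem pv_outLoop_spec (offset step : Int) (V : List (List String)) :
    ∀ (idx : Int) (arr : List (List String)), 0 ≤ idx →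
      pvOutLoop offset step idx arr V = arr ++ (V.drop (offset - idx).toNat).take
        (if step + offset > max offset idx then (step + offset - max offset idx).toNat else V.length) := by
  induction V with
  | nil => intro idx arr _; simp [pvOutLoop]
  | cons item rest ih =>
    intro idx arr hidx
    rw [pvOutLoop]
    by_cases h1 : idx + 1 ≤ offset
    · rw [if_pos h1, ih (idx + 1) arr (by omega)]
      have hd : (offset - idx).toNat = (offset - (idx + 1)).toNat + 1 := by omega
      have hm : max offset (idx + 1) = max offset idx := by omega
      rw [hd, hm, List.drop_succ_cons]
      by_cases h2 : step + offset > max offset idx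
      · rw [if_pos h2, if_pos h2]
      · rw [if_neg h2, if_neg h2]
        have hlen : rest.length ≤ (item :: rest).length := by simp
        rw [List.take_of_length_le (le_trans (List.length_drop ▸ Nat.sub_le _ _) hlen),
          List.take_of_length_le (le_trans (List.length_drop ▸ Nat.sub_le _ _) (le_refl _))]
    · rw [if_neg h1]
      have hmax : max offset idx = idx := by omega
      have hd0 : (offset - idx).toNat = 0 := by omega
      by_cases h2 : idx + 1 = step + offset
      · rw [if_pos h2, hmax, hd0]
        rw [if_pos (by omega)]
        have : (step + offset - idx).toNat = 1 := by omega
        rw [this, List.drop_zero, List.take_succ_cons, List.take_zero]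
      · rw [if_neg h2, ih (idx + 1) (arr ++ [item]) (by omega), hmax, hd0]
        have hd1 : (offset - (idx + 1)).toNat = 0 := by omega
        have hm1 : max offset (idx + 1) = idx + 1 := by omega
        rw [hd1, hm1, List.drop_zero, List.drop_zero]
        by_cases h3 : step + offset > idx
        · rw [if_pos (by omega), if_pos (by omega)]
          have : (step + offset - idx).toNat = (step + offset - (idx + 1)).toNat + 1 := by omega
          rw [this, List.take_succ_cons, List.append_assoc]
          rfl
        · rw [if_neg (by omega), if_neg (by omega)]
          rw [List.take_of_length_le (le_refl _), List.take_of_length_le (by simp), List.append_assoc]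
          rfl

theorem pv_out_eq (offset step : Int) (V : List (List String)) :
    pvOutLoop offset step 0 [] V =
      (if step + offset > (if offset > 0 then offset else 0)
       then PySem.List.slice V (some (if offset > 0 then offset else 0)) (some (step + offset))
       else PySem.List.slice V (some (if offset > 0 then offset else 0)) none) := by
  rw [pv_outLoop_spec offset step V 0 [] (le_refl 0), List.nil_append]
  set start : Int := if offset > 0 then offset else 0 with hstart
  have hstart0 : 0 ≤ start := by rw [hstart]; split_ifs <;> omega
  have hmax : max offset 0 = start := by rw [hstart]; split_ifs <;> omega
  have hdrop : (offset - 0).toNat = start.toNat := by rw [hstart]; split_ifs <;> omega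
  rw [hmax, hdrop]
  by_cases h : step + offset > start
  · rw [if_pos h, if_pos h, PySem.List.slice_toNat V hstart0 (by omega)]
    have : (step + offset - start).toNat = (step + offset).toNat - start.toNat := by omega
    rw [this]
  · rw [if_neg h, if_neg h, PySem.List.slice_from V hstart0]
    exact List.take_of_length_le (List.length_drop ▸ Nat.sub_le _ _)

-- ---------- membership and order structure of the triple list ----------

theorem pv_flatMap_singleton {α β : Type} (f : α → β) (l : List α) :
    l.flatMap (fun x => [f x]) = l.map f := by
  induction l <;> simp_all

theorem pv_mem_T {first last : Int} {t : Int × Int × Int} :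
    t ∈ pvT first last ↔
      (t.1 ∈ pvL first last ∧ t.2.1 ∈ pvL first last ∧ t.2.2 ∈ pvL first last ∧ pvDistinct t) := by
  rcases t with ⟨a, b, c⟩
  simp only [pvT, List.mem_flatMap, List.mem_map, List.mem_filter, pvDistinct]
  constructor
  · rintro ⟨a', ha', b', hb', c', ⟨hc', hcond⟩, heq⟩
    obtain ⟨rfl, rfl, rfl⟩ : a' = a ∧ b' = b ∧ c' = c := by
      injection heq with h1 h'; injection h' with h2 h3; exact ⟨h1, h2, h3⟩
    simp only [Bool.not_eq_true', decide_eq_false_iff_not] at hcond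
    refine ⟨ha', hb', hc', ?_, ?_, ?_⟩ <;> tauto
  · rintro ⟨ha, hb, hc, h1, h2, h3⟩
    exact ⟨a, ha, b, hb, c, ⟨hc, by simp only [Bool.not_eq_true', decide_eq_false_iff_not]; tauto⟩, rfl⟩

theorem pv_pairwise_T (first last : Int) : (pvT first last).Pairwise pvLt3 := by
  have hL : (pvL first last).Pairwise (· < ·) := PySem.List.pairwise_lt_pyRange_one _ _
  unfold pvT
  rw [List.pairwise_flatMap]
  constructor
  · intro a _
    rw [List.pairwise_flatMap]
    constructor
    · intro b _
      rw [List.pairwise_map]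
      exact (List.Pairwise.sublist (List.filter_sublist) hL).imp
        (fun h => Or.inr ⟨rfl, Or.inr ⟨rfl, h⟩⟩)
    · refine hL.imp ?_
      intro b1 b2 hlt x hx y hy
      obtain ⟨c1, -, rfl⟩ := List.mem_map.mp hx
      obtain ⟨c2, -, rfl⟩ := List.mem_map.mp hy
      exact Or.inr ⟨rfl, Or.inl hlt⟩
  · refine hL.imp ?_
    intro a1 a2 hlt x hx y hy
    obtain ⟨b1, -, hx'⟩ := List.mem_flatMap.mp hx
    obtain ⟨c1, -, rfl⟩ := List.mem_map.mp hx'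
    obtain ⟨b2, -, hy'⟩ := List.mem_flatMap.mp hy
    obtain ⟨c2, -, rfl⟩ := List.mem_map.mp hy'
    exact Or.inl hlt

theorem pv_mem_combos {first last : Int} {t : Int × Int × Int} :
    t ∈ pvCombos first last ↔
      (first ≤ t.1 ∧ t.1 < t.2.1 ∧ t.2.1 < t.2.2 ∧ t.2.2 < last) := by
  rcases t with ⟨x, y, z⟩
  simp only [pvCombos, List.mem_filter, pv_mem_T, pvL, PySem.List.mem_pyRange_one, beq_iff_eq]
  constructor
  · rintro ⟨⟨hx, hy, hz, hd⟩, hfix⟩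
    have := (pvM3_fix hd).mp hfix
    simp only at this ⊢
    omega
  · rintro ⟨h1, h2, h3, h4⟩
    have hd : pvDistinct (x, y, z) := by simp only [pvDistinct]; omega
    refine ⟨⟨by omega, by omega, by omega, hd⟩, ?_⟩
    exact (pvM3_fix hd).mpr (by simp only; omega)

theorem pv_mem_Btrip {first last : Int} {t : Int × Int × Int} :
    t ∈ pvBtrip first last ↔
      (first ≤ t.1 ∧ t.1 < t.2.1 ∧ t.2.1 < t.2.2 ∧ t.2.2 < last) := by
  rcases t with ⟨x, y, z⟩
  simp only [pvBtrip, List.mem_flatMap, List.mem_map, pvL, PySem.List.mem_pyRange_one]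
  constructor
  · rintro ⟨x', hx', y', hy', z', hz', heq⟩
    obtain ⟨rfl, rfl, rfl⟩ : x' = x ∧ y' = y ∧ z' = z := by
      injection heq with h1 h'; injection h' with h2 h3; exact ⟨h1, h2, h3⟩
    omega
  · rintro ⟨h1, h2, h3, h4⟩
    exact ⟨x, by omega, y, by omega, z, by omega, rfl⟩

theorem pv_pairwise_Btrip (first last : Int) : (pvBtrip first last).Pairwise pvLt3 := by
  unfold pvBtrip
  rw [List.pairwise_flatMap]
  constructor
  · intro x _
    rw [List.pairwise_flatMap]
    constructor
    · intro y _
      rw [List.pairwise_map]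
      exact (PySem.List.pairwise_lt_pyRange_one _ _).imp (fun h => Or.inr ⟨rfl, Or.inr ⟨rfl, h⟩⟩)
    · refine (PySem.List.pairwise_lt_pyRange_one _ _).imp ?_
      intro y1 y2 hlt u hu v hv
      obtain ⟨z1, -, rfl⟩ := List.mem_map.mp hu
      obtain ⟨z2, -, rfl⟩ := List.mem_map.mp hv
      exact Or.inr ⟨rfl, Or.inl hlt⟩
  · refine (PySem.List.pairwise_lt_pyRange_one _ _).imp ?_
    intro x1 x2 hlt u hu v hv
    obtain ⟨y1, -, hu'⟩ := List.mem_flatMap.mp hu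
    obtain ⟨z1, -, rfl⟩ := List.mem_map.mp hu'
    obtain ⟨y2, -, hv'⟩ := List.mem_flatMap.mp hv
    obtain ⟨z2, -, rfl⟩ := List.mem_map.mp hv'
    exact Or.inl hlt

theorem pv_combos_eq_Btrip (first last : Int) : pvCombos first last = pvBtrip first last := by
  have h1 : (pvCombos first last).Pairwise pvLt3 :=
    List.Pairwise.sublist (List.filter_sublist) (pv_pairwise_T first last)
  have h2 := pv_pairwise_Btrip first last
  refine List.Perm.eq_of_pairwise (le := pvLt3) ?_ h1 h2 ?_
  · exact fun a b _ _ hab hba => absurd (pvLt3_asymm hab hba) not_false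
  · rw [List.perm_ext_iff_of_nodup (pv_nodup_of_pairwise h1) (pv_nodup_of_pairwise h2)]
    intro t
    rw [pv_mem_combos, pv_mem_Btrip]

-- ---------- injectivity of A's string keys ----------

theorem pv_core_shift : ∀ (f n : Nat) (ds : List Char),
    Nat.toDigitsCore 10 f n ds = Nat.toDigitsCore 10 f n [] ++ ds := by
  intro f
  induction f with
  | zero => intro n ds; rw [Nat.toDigitsCore, Nat.toDigitsCore]; rfl
  | succ f ih =>
    intro n ds
    rw [Nat.toDigitsCore, Nat.toDigitsCore]
    by_cases h : n / 10 = 0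
    · rw [if_pos h, if_pos h]; rfl
    · rw [if_neg h, if_neg h, ih (n / 10) ((n % 10).digitChar :: ds),
        ih (n / 10) [(n % 10).digitChar], List.append_assoc]
      rfl

theorem pv_digitChar_digit {k : Nat} (h : k < 10) : (Nat.digitChar k).isDigit = true := by
  interval_cases k <;> decide

theorem pv_digitChar_val {k : Nat} (h : k < 10) : (Nat.digitChar k).toNat = k + 48 := by
  interval_cases k <;> decide

theorem pv_core_digits : ∀ (f n : Nat), ∀ c ∈ Nat.toDigitsCore 10 f n [], c.isDigit = true := by
  intro f
  induction f with
  | zero => intro n c hc; rw [Nat.toDigitsCore] at hc; simp at hc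
  | succ f ih =>
    intro n c hc
    rw [Nat.toDigitsCore] at hc
    by_cases h : n / 10 = 0
    · rw [if_pos h] at hc
      rcases List.mem_singleton.mp hc with rfl
      exact pv_digitChar_digit (Nat.mod_lt _ (by norm_num))
    · rw [if_neg h, pv_core_shift] at hc
      rcases List.mem_append.mp hc with h1 | h1
      · exact ih (n / 10) c h1
      · rcases List.mem_singleton.mp h1 with rfl
        exact pv_digitChar_digit (Nat.mod_lt _ (by norm_num))

def pvReadNat (l : List Char) : Nat := l.foldl (fun a c => 10 * a + (c.toNat - 48)) 0

theorem pv_read_core : ∀ (f n : Nat), n < f → pvReadNat (Nat.toDigitsCore 10 f n []) = n := by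
  intro f
  induction f with
  | zero => intro n h; omega
  | succ f ih =>
    intro n h
    rw [Nat.toDigitsCore]
    by_cases h0 : n / 10 = 0
    · rw [if_pos h0]
      simp only [pvReadNat, List.foldl_cons, List.foldl_nil]
      rw [pv_digitChar_val (Nat.mod_lt _ (by norm_num : (0:Nat) < 10))]
      omega
    · rw [if_neg h0, pv_core_shift]
      have hrec := ih (n / 10) (by omega)
      simp only [pvReadNat, List.foldl_append, List.foldl_cons, List.foldl_nil] at hrec ⊢
      rw [hrec, pv_digitChar_val (Nat.mod_lt _ (by norm_num : (0:Nat) < 10))]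
      omega

theorem pv_toDigits_inj {n m : Nat} (h : Nat.toDigits 10 n = Nat.toDigits 10 m) : n = m := by
  have h1 := pv_read_core (n + 1) n (by omega)
  have h2 := pv_read_core (m + 1) m (by omega)
  rw [Nat.toDigits, Nat.toDigits] at h
  rw [← h1, h, h2]

theorem pv_toDigits_ne_nil (n : Nat) : Nat.toDigits 10 n ≠ [] := by
  rw [Nat.toDigits, Nat.toDigitsCore]
  by_cases h : n / 10 = 0
  · rw [if_pos h]; simp
  · rw [if_neg h, pv_core_shift]; simp

theorem pv_toDigits_digits {n : Nat} {c : Char} (h : c ∈ Nat.toDigits 10 n) : c.isDigit = true :=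
  pv_core_digits (n + 1) n c h

theorem pv_toChars_chars {n : Int} {c : Char} (h : c ∈ PySem.Int.toChars n) :
    c.isDigit = true ∨ c = '-' := by
  unfold PySem.Int.toChars at h
  by_cases hn : n < 0
  · rw [if_pos hn] at h
    rcases List.mem_cons.mp h with rfl | h1
    · exact Or.inr rfl
    · exact Or.inl (pv_toDigits_digits h1)
  · rw [if_neg hn] at h
    exact Or.inl (pv_toDigits_digits h)

theorem pv_toChars_inj : Function.Injective PySem.Int.toChars := by
  intro n m h
  unfold PySem.Int.toChars at h
  by_cases hn : n < 0 <;> by_cases hm : m < 0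
  · rw [if_pos hn, if_pos hm] at h
    injection h with h1 h2
    have := pv_toDigits_inj h2
    omega
  · rw [if_pos hn, if_neg hm] at h
    exfalso
    cases hd : Nat.toDigits 10 m.toNat with
    | nil => exact pv_toDigits_ne_nil _ hd
    | cons c cs =>
      rw [hd] at h
      injection h with h1 _
      have : c.isDigit = true := pv_toDigits_digits (hd ▸ List.mem_cons_self)
      rw [← h1] at this
      simp at this
  · rw [if_neg hn, if_pos hm] at h
    exfalso
    cases hd : Nat.toDigits 10 n.toNat with
    | nil => exact pv_toDigits_ne_nil _ hd
    | cons c cs =>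
      rw [hd] at h
      injection h with h1 _
      have : c.isDigit = true := pv_toDigits_digits (hd ▸ List.mem_cons_self)
      rw [h1] at this
      simp at this
  · rw [if_neg hn, if_neg hm] at h
    have := pv_toDigits_inj h
    omega

theorem pv_marker_split (m : Char) : ∀ (A B RA RB : List Char),
    (∀ c ∈ A, c ≠ m) → (∀ c ∈ B, c ≠ m) → A ++ m :: RA = B ++ m :: RB → A = B ∧ RA = RB := by
  intro A
  induction A with
  | nil =>
    intro B RA RB _ hB h
    cases B with
    | nil => simpa using h
    | cons b B' =>
      exfalso
      rw [List.nil_append, List.cons_append] at h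
      exact hB b List.mem_cons_self ((List.cons_eq_cons.mp h).1.symm)
  | cons a A' ih =>
    intro B RA RB hA hB h
    cases B with
    | nil =>
      exfalso
      rw [List.nil_append, List.cons_append] at h
      exact hA a List.mem_cons_self (List.cons_eq_cons.mp h).1
    | cons b B' =>
      rw [List.cons_append, List.cons_append] at h
      obtain ⟨h1, h2⟩ := List.cons_eq_cons.mp h
      obtain ⟨hAB, hR⟩ := ih B' RA RB (fun c hc => hA c (List.mem_cons_of_mem _ hc))
        (fun c hc => hB c (List.mem_cons_of_mem _ hc)) h2
      exact ⟨by rw [h1, hAB], hR⟩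

theorem pv_toChars_ne {n : Int} {c : Char} (h : c ∈ PySem.Int.toChars n) : c ≠ ',' ∧ c ≠ ']' := by
  rcases pv_toChars_chars h with hd | rfl
  · constructor <;> (rintro rfl; simp at hd)
  · constructor <;> decide

theorem pv_key3_inj : Function.Injective pvKey3 := by
  rintro ⟨a, b, c⟩ ⟨d, e, f⟩ h
  have hl := congrArg String.toList h
  simp only [pvKey3, pvStrOfIntList, String.toList_ofList] at hl
  have hrepr : ∀ x y z : Int, pvReprChars [x, y, z] =
      PySem.Int.toChars x ++ ',' :: ' ' :: (PySem.Int.toChars y ++ ',' :: ' ' :: PySem.Int.toChars z) := by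
    intro x y z; rfl
  injection hl with _ hl2
  rw [hrepr, hrepr] at hl2
  simp only [List.append_assoc, List.cons_append] at hl2
  obtain ⟨h1, hrest⟩ := pv_marker_split ',' _ _ _ _
    (fun ch hc => (pv_toChars_ne hc).1) (fun ch hc => (pv_toChars_ne hc).1) hl2
  injection hrest with _ hrest2
  obtain ⟨h2, hrest3⟩ := pv_marker_split ',' _ _ _ _
    (fun ch hc => (pv_toChars_ne hc).1) (fun ch hc => (pv_toChars_ne hc).1) hrest2
  injection hrest3 with _ hrest4
  obtain ⟨h3, -⟩ := pv_marker_split ']' _ _ _ _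
    (fun ch hc => (pv_toChars_ne hc).2) (fun ch hc => (pv_toChars_ne hc).2) hrest4
  obtain rfl : a = d := pv_toChars_inj h1
  obtain rfl : b = e := pv_toChars_inj h2
  obtain rfl : c = f := pv_toChars_inj h3
  rfl

-- ---------- the final dict: keys in combination order, last-written values ----------

theorem pv_m3_rev {x y z : Int} (h1 : x < y) (h2 : y < z) : pvM3 (z, y, x) = (x, y, z) := by
  simp only [pvM3]
  split_ifs <;> first | rfl | (exfalso; omega)

theorem pv_getLast_of_max {α : Type} (r : α → α → Prop) (hasym : ∀ a b, r a b → r b a → False) :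
    ∀ (l : List α) (m : α), l.Pairwise r → m ∈ l → (∀ u ∈ l, u = m ∨ r u m) →
      l.getLast? = some m := by
  intro l
  induction l with
  | nil => intro m _ hm _; simp at hm
  | cons a l ih =>
    intro m hP hm hmax
    cases l with
    | nil =>
      rcases List.mem_singleton.mp hm with rfl
      rfl
    | cons b l' =>
      have hmem : m ∈ b :: l' := by
        rcases List.mem_cons.mp hm with heq | h
        · exfalso
          have h1 : r a b := (List.pairwise_cons.mp hP).1 b List.mem_cons_self
          rcases hmax b (List.mem_cons_of_mem _ List.mem_cons_self) with heq2 | hr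
          · rw [heq2, heq] at h1
            exact hasym a a h1 h1
          · rw [heq] at hr
            exact hasym a b h1 hr
        · exact h
      rw [List.getLast?_cons_cons]
      exact ih m hP.tail hmem (fun u hu => hmax u (List.mem_cons_of_mem _ hu))

theorem pv_filter_last {first last : Int} {t0 : Int × Int × Int} (ht0 : t0 ∈ pvCombos first last) :
    ((pvT first last).filter fun t => pvM3 t == t0).getLast? = some (t0.2.2, t0.2.1, t0.1) := by
  obtain ⟨hx, hxy, hyz, hz⟩ := pv_mem_combos.mp ht0
  rcases t0 with ⟨x, y, z⟩
  simp only at hx hxy hyz hz ⊢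
  apply pv_getLast_of_max pvLt3 (fun a b => pvLt3_asymm)
  · exact List.Pairwise.sublist (List.filter_sublist) (pv_pairwise_T first last)
  · rw [List.mem_filter, pv_mem_T]
    refine ⟨⟨?_, ?_, ?_, ?_⟩, ?_⟩
    · show z ∈ pvL first last
      simp only [pvL, PySem.List.mem_pyRange_one]; omega
    · show y ∈ pvL first last
      simp only [pvL, PySem.List.mem_pyRange_one]; omega
    · show x ∈ pvL first last
      simp only [pvL, PySem.List.mem_pyRange_one]; omega
    · show z ≠ y ∧ z ≠ x ∧ y ≠ x
      omega
    · exact beq_iff_eq.mpr (pv_m3_rev hxy hyz)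
  · intro u hu
    have hm3 : pvM3 u = (x, y, z) := beq_iff_eq.mp (List.mem_filter.mp hu).2
    have hfib := pvM3_fiber hm3
    simp only [List.mem_cons, List.not_mem_nil, or_false] at hfib
    rcases hfib with rfl | rfl | rfl | rfl | rfl | rfl
    · exact Or.inr (Or.inl (show x < z by omega))
    · exact Or.inr (Or.inl (show x < z by omega))
    · exact Or.inr (Or.inl (show y < z by omega))
    · exact Or.inr (Or.inl (show y < z by omega))
    · exact Or.inr (Or.inr ⟨rfl, Or.inl (show x < y by omega)⟩)
    · exact Or.inl rfl

theorem pv_m3_mem_T {first last : Int} {t : Int × Int × Int} (h : t ∈ pvT first last) :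
    pvM3 t ∈ pvT first last := by
  rw [pv_mem_T] at h ⊢
  obtain ⟨h1, h2, h3, hd⟩ := h
  obtain ⟨hd', hm1, hm2, hm3⟩ := pvM3_comp_mem hd
  simp only [List.mem_cons, List.not_mem_nil, or_false] at hm1 hm2 hm3
  refine ⟨?_, ?_, ?_, hd'⟩
  · rcases hm1 with h | h | h <;> rw [h] <;> assumption
  · rcases hm2 with h | h | h <;> rw [h] <;> assumption
  · rcases hm3 with h | h | h <;> rw [h] <;> assumption

theorem pv_values_eq (first last : Int) (pat : String) :
    ((pvT first last).foldl (fun d t => d.insert (pvKey3 (pvM3 t)) (pvVal pat t))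
        PySem.Dict.empty).values = (pvCombos first last).map (pvFinal pat) := by
  set D := (pvT first last).foldl (fun d t => d.insert (pvKey3 (pvM3 t)) (pvVal pat t))
    PySem.Dict.empty with hD
  have hnodup : D.keys.Nodup := by
    rw [hD]
    exact PySem.Dict.nodup_keys_foldl_insert_key _ _ _ _
      (by rw [PySem.Dict.keys_empty]; exact List.nodup_nil)
  have hmapm3 : (pvCombos first last).map pvM3 = pvCombos first last := by
    have : ∀ t ∈ pvCombos first last, pvM3 t = t := by
      intro t ht
      exact beq_iff_eq.mp (List.mem_filter.mp ht).2
    rw [List.map_congr_left (g := id) this, List.map_id]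
  have hkeys : D.keys = (pvCombos first last).map pvKey3 := by
    rw [hD, PySem.Dict.keys_foldl_insert_key _ (fun t => pvKey3 (pvM3 t)) _ _,
      PySem.Dict.keys_empty]
    show PySem.List.dedup ((pvT first last).map fun t => pvKey3 (pvM3 t)) = _
    rw [show ((pvT first last).map fun t => pvKey3 (pvM3 t)) =
        (((pvT first last).map pvM3).map pvKey3) from by rw [List.map_map]; rfl]
    rw [pv_dedup_map_inj pvKey3 pv_key3_inj]
    rw [pv_dedup_retract pvLt3 (fun a b => pvLt3_asymm) pvM3 _ (pv_pairwise_T first last)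
      (fun t ht => pv_m3_mem_T ht)
      (fun t ht => pvM3_le (pv_mem_T.mp ht).2.2.2)
      (fun t ht => pvM3_idem (pv_mem_T.mp ht).2.2.2)]
    show ((pvCombos first last).map pvM3).map pvKey3 = _
    rw [hmapm3]
  show D.items.map (fun p => p.2) = _
  rw [PySem.Dict.items_eq_map_keys D hnodup [], List.map_map, hkeys, List.map_map]
  apply List.map_congr_left
  intro t0 ht0
  show D.getD (pvKey3 t0) [] = pvFinal pat t0
  rw [PySem.Dict.getD_eq_get?_getD, hD,
    pv_get?_fold (fun t => pvKey3 (pvM3 t)) (pvVal pat) (pvT first last) PySem.Dict.empty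
      (pvKey3 t0)]
  have hfe : ((pvT first last).filter fun t => pvKey3 (pvM3 t) == pvKey3 t0) =
      ((pvT first last).filter fun t => pvM3 t == t0) := by
    apply List.filter_congr
    intro u _
    by_cases h : pvM3 u = t0
    · rw [beq_iff_eq.mpr h, beq_iff_eq.mpr (congrArg pvKey3 h)]
    · rw [beq_false_of_ne (fun hk => h (pv_key3_inj hk)), beq_false_of_ne h]
  rw [hfe, pv_filter_last ht0]
  rcases t0 with ⟨x, y, z⟩
  simp [pvVal, pvFinal]

-- ---------- the ports, reshaped ----------

theorem pv_arr_eq (l : List Int) : l.foldl (fun a i => a ++ [i]) [] = l := by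
  rw [PySem.List.foldl_append_eq_flatMap]; simp

theorem pv_dictA_eq (first last : Int) (pat : String) :
    ((pvL first last).foldl (fun d a =>
      (pvL first last).foldl (fun d b =>
        (pvL first last).foldl (fun d c =>
          if (a = b ∧ b = c) ∨ a = b ∨ a = c ∨ b = c then d
          else d.insert (pvStrOfIntList (PySem.List.sorted [a, b, c] (fun x => x)))
                 [pat ++ PySem.Int.toStr c, pat ++ PySem.Int.toStr b, pat ++ PySem.Int.toStr a]) d) d)
      (PySem.Dict.empty : PySem.Dict String (List String)))
    = (pvT first last).foldl (fun d t => d.insert (pvKey3 (pvM3 t)) (pvVal pat t))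
        PySem.Dict.empty := by
  unfold pvT
  rw [List.foldl_flatMap]
  apply PySem.List.foldl_congr_mem
  intro acc a _
  rw [List.foldl_flatMap]
  apply PySem.List.foldl_congr_mem
  intro acc2 b _
  rw [List.foldl_map, List.foldl_filter]
  apply PySem.List.foldl_congr_mem
  intro acc3 c _
  by_cases hcond : (a = b ∧ b = c) ∨ a = b ∨ a = c ∨ b = c
  · rw [if_pos hcond, if_neg (by simp [hcond])]
  · have hd : pvDistinct (a, b, c) := by
      simp only [pvDistinct]
      constructor
      · exact fun h => hcond (Or.inr (Or.inl h))
      constructor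
      · exact fun h => hcond (Or.inr (Or.inr (Or.inl h)))
      · exact fun h => hcond (Or.inr (Or.inr (Or.inr h)))
    rw [if_neg hcond, if_pos (by simp [hcond])]
    rw [pv_sorted_eq_m3 hd]
    rfl

theorem pv_Bout_eq (first last : Int) (pat : String) :
    ((pvL first last).foldl (fun out x =>
      (PySem.List.pyRange (x + 1) last 1).foldl (fun out y =>
        (PySem.List.pyRange (y + 1) last 1).foldl (fun out z =>
          out ++ [[pat ++ PySem.Int.toStr x, pat ++ PySem.Int.toStr y, pat ++ PySem.Int.toStr z]])
          out) out) ([] : List (List String)))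
    = (pvBtrip first last).map (pvFinal pat) := by
  simp only [PySem.List.foldl_append_eq_flatMap]
  unfold pvBtrip
  simp only [List.map_flatMap, List.map_map, List.nil_append]
  simp only [pv_flatMap_singleton, Function.comp_def, pvFinal]

theorem pv_main : ∀ (first last offset step : Int) (pat : String),
    create_uniq_names first last offset step pat = create_uniq_names_alt first last offset step pat := by
  intro first last offset step pat
  unfold create_uniq_names create_uniq_names_alt
  simp only []
  rw [pv_arr_eq]
  rw [show PySem.List.pyRange first last 1 = pvL first last from rfl]
  rw [pv_dictA_eq first last pat, pv_values_eq first last pat, pv_out_eq,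
    pv_Bout_eq first last pat, pv_combos_eq_Btrip first last]

-- ===== VERDICT (by name: the statement is the Claim_ definition above) =====
theorem create_uniq_names_spec : Claim_equal_create_uniq_names := by
  intro first last offset step pat _
  unfold Spec_create_uniq_names
  exact pv_main first last offset step pat
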